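-- pv_equiv track=rewrite | github.com/khalidsaif912/Activity-Report | data/offload/build_offload_latest.py | find_value_after_label
-- ===== SOURCE A (Python) =====
-- def norm(text: str) -> str:
--     return " ".join(str(text).split()).strip()
--
-- def find_value_after_label(row, label):
--     label = label.upper()
--     for i, cell in enumerate(row):
--         if norm(cell).upper() == label:
--             for j in range(i + 1, len(row)):
--                 value = norm(row[j])
--                 if value:
--                     return value
--     return ""
-- ===== SOURCE B (Python) =====
-- def norm(text: str) -> str:
--     return " ".join(str(text).split()).strip()
--
-- def find_value_after_label(row, label):
--     # single pass: arm a flag at the label cell, return the first non-empty value after it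
--     lab = label.upper()
--     seen = False
--     for cell in row:
--         n = norm(cell)
--         if seen and n:
--             return n
--         if n.upper() == lab:
--             seen = True
--     return ""
-- ===== Notes on version B (the rewrite author's own statement) =====
-- stated objective: simpler
-- what changed: Replaces the nested scans (restarting an inner index loop at every label match) by one linear pass carrying a boolean 'seen the label' flag.
import Mathlib
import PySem

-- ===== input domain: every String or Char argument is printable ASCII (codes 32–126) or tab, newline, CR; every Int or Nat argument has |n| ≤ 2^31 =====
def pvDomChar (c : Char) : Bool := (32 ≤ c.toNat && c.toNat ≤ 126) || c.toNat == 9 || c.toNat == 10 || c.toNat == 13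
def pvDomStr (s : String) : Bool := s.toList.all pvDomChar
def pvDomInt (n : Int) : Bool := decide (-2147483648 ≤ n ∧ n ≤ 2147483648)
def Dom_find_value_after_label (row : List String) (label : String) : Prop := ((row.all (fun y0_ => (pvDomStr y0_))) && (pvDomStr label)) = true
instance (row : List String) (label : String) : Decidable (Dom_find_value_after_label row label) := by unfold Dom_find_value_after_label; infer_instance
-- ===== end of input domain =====

-- B replaces A's nested scans by one linear pass with a 'seen the label' flag (simpler).

-- ===== PORT A =====
-- norm(text) = " ".join(str(text).split()).strip()
def pvNorm (t : String) : String := PySem.Str.strip (PySem.Str.join " " (PySem.Str.split₀ t))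

-- inner loop: for j in range(i+1, len(row)): value = norm(row[j]); if value: return value
def pvAInner (row : List String) : List Int → Option String
  | [] => none
  | j :: js =>
    let value := pvNorm (PySem.List.pyGetD row j "")   -- row[j]: j always in range here
    if value ≠ "" then some value else pvAInner row js

-- outer loop over enumerate(row)
def pvAOuter (row : List String) (labU : String) : List (Int × String) → String
  | [] => ""
  | (i, cell) :: rest =>
    if PySem.Str.upper (pvNorm cell) = labU then
      match pvAInner row (PySem.List.pyRange (i + 1) (PySem.List.len row) 1) with
      | some v => v
      | none => pvAOuter row labU rest
    else pvAOuter row labU rest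

def find_value_after_label (row : List String) (label : String) : String :=
  pvAOuter row (PySem.Str.upper label) (PySem.List.enumerate row 0)

-- ===== PORT B =====
def pvBLoop (labU : String) : List String → Bool → String
  | [], _ => ""
  | cell :: rest, seen =>
    let n := pvNorm cell
    if seen && n ≠ "" then n
    else pvBLoop labU rest (seen || (PySem.Str.upper n = labU))

def find_value_after_label_alt (row : List String) (label : String) : String :=
  pvBLoop (PySem.Str.upper label) row false

-- ===== PRECONDITION & SPEC =====
def Spec_find_value_after_label (row : List String) (label : String) (out : String) : Prop := out = find_value_after_label_alt row label
instance (row : List String) (label : String) (out : String) : Decidable (Spec_find_value_after_label row label out) := by unfold Spec_find_value_after_label; infer_instance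

-- ===== CLAIM (what is proved, stated in full; the proofs are below) =====
def Claim_equal_find_value_after_label : Prop := ∀ (row : List String) (label : String), Dom_find_value_after_label row label → Spec_find_value_after_label row label (find_value_after_label row label)

-- ===== LEMMAS AND PROOFS =====

/-- First non-empty normalised cell of a list. -/
def pvFirstNE : List String → Option String
  | [] => none
  | c :: rest => if pvNorm c ≠ "" then some (pvNorm c) else pvFirstNE rest

theorem pvBLoop_true (labU : String) (l : List String) :
    pvBLoop labU l true = (pvFirstNE l).getD "" := by
  induction l with
  | nil => rfl
  | cons c rest ih =>
    simp only [pvBLoop, pvFirstNE]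
    by_cases h : pvNorm c = ""
    · simp [h, ih]
    · simp [h]

theorem pvAInner_eq (row : List String) (i : Nat) :
    pvAInner row (PySem.List.pyRange (i : Int) (PySem.List.len row) 1) = pvFirstNE (row.drop i) := by
  by_cases hi : i < row.length
  · rw [List.drop_eq_getElem_cons hi]
    have hlt : (i : Int) < PySem.List.len row := by
      simp [PySem.List.len_eq]; exact_mod_cast hi
    rw [PySem.List.pyRange_one_cons hlt]
    have hget : PySem.List.pyGetD row (i : Int) "" = row[i] := by
      simp [PySem.List.pyGetD_natCast, hi]
    simp only [pvAInner, pvFirstNE, hget]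
    by_cases h : pvNorm row[i] = ""
    · rw [if_neg (by simp [h]), if_neg (by simp [h])]
      have hc : ((i : Int) + 1) = ((i + 1 : Nat) : Int) := by push_cast; ring
      rw [hc, pvAInner_eq row (i + 1)]
    · simp [h]
  · have hge : row.length ≤ i := Nat.le_of_not_lt hi
    rw [PySem.List.pyRange_one_eq_nil (by simp [PySem.List.len_eq]; exact_mod_cast hge)]
    rw [List.drop_eq_nil_of_le hge]
    rfl
termination_by row.length - i

theorem pvAOuter_empty (row : List String) (labU : String) (s : List String) (i : Nat)
    (hs : s = row.drop i) (hne : pvFirstNE s = none) :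
    pvAOuter row labU (PySem.List.enumerate s (i : Int)) = "" := by
  induction s generalizing i with
  | nil => rfl
  | cons c rest ih =>
    have hc : pvNorm c = "" := by
      by_contra h; simp [pvFirstNE, h] at hne
    have hrest : pvFirstNE rest = none := by
      simpa [pvFirstNE, hc] using hne
    have hrest' : rest = row.drop (i + 1) := by
      have := congrArg List.tail hs
      simpa [List.tail_drop] using this
    have hrec : pvAOuter row labU (PySem.List.enumerate rest ((i : Int) + 1)) = "" := by
      have : ((i : Int) + 1) = ((i + 1 : Nat) : Int) := by push_cast; ring
      rw [this]; exact ih (i + 1) hrest' hrest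
    rw [PySem.List.enumerate_cons]
    simp only [pvAOuter]
    by_cases hl : PySem.Str.upper (pvNorm c) = labU
    · rw [if_pos hl]
      have : ((i : Int) + 1) = ((i + 1 : Nat) : Int) := by push_cast; ring
      rw [this, pvAInner_eq row (i + 1), ← hrest', hrest]
      exact hrec
    · rw [if_neg hl]; exact hrec

theorem pvMain (row : List String) (labU : String) (s : List String) (i : Nat)
    (hs : s = row.drop i) :
    pvAOuter row labU (PySem.List.enumerate s (i : Int)) = pvBLoop labU s false := by
  induction s generalizing i with
  | nil => rfl
  | cons c rest ih =>
    have hrest' : rest = row.drop (i + 1) := by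
      have := congrArg List.tail hs
      simpa [List.tail_drop] using this
    have hcast : ((i : Int) + 1) = ((i + 1 : Nat) : Int) := by push_cast; ring
    rw [PySem.List.enumerate_cons]
    simp only [pvAOuter, pvBLoop]
    by_cases hl : PySem.Str.upper (pvNorm c) = labU
    · rw [if_pos hl]
      simp only [hl, Bool.false_and, Bool.false_or, decide_true, ne_eq, if_neg Bool.false_ne_true]
      rw [hcast, pvAInner_eq row (i + 1), ← hrest']
      rw [pvBLoop_true]
      cases hfe : pvFirstNE rest with
      | some v => simp
      | none =>
        simp only [Option.getD_none]
        exact pvAOuter_empty row labU rest (i + 1) hrest' hfe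
    · rw [if_neg hl]
      simp only [hl, Bool.false_and, Bool.false_or, decide_false, if_neg Bool.false_ne_true]
      rw [hcast]
      exact ih (i + 1) hrest'

-- ===== VERDICT (by name: the statement is the Claim_ definition above) =====
theorem find_value_after_label_spec : Claim_equal_find_value_after_label := by
  intro row label _
  unfold Spec_find_value_after_label find_value_after_label find_value_after_label_alt
  have := pvMain row (PySem.Str.upper label) row 0 (by simp)
  simpa using this
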